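-- pv_equiv track=rewrite | github.com/iosif-blezu/FP | A5/src/program.py | getFreq
-- ===== SOURCE A (Python) =====
-- def getFreq(number1, number2):
--     """
--     Sticks the numbers on to each other and does the frequency array  of it.
--     :param number1:
--     :param number2:
--     :return: frequency array
--     """
--     number1 = abs(number1)
--     number2 = abs(number2)
--     if number2 != 0:
--         digits = len(str(number2))
--     else:
--         digits = 0
--     number = number1 * (10 ** digits) + number2
--     freq = [0] * 10
--     while number > 0:
--         freq[number % 10] = 1
--         number = number // 10
--     return freq
-- ===== SOURCE B (Python) =====
-- def getFreq(number1, number2):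
--     freq = [0] * 10
--     for value in (number1, number2):
--         n = abs(value)
--         while n > 0:
--             freq[n % 10] = 1
--             n //= 10
--     return freq
-- ===== Notes on version B (the rewrite author's own statement) =====
-- stated objective: simpler
-- what changed: B drops the str()-length and arithmetic concatenation entirely and instead marks the digits of each operand independently with one small while-loop per operand.
import Mathlib
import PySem

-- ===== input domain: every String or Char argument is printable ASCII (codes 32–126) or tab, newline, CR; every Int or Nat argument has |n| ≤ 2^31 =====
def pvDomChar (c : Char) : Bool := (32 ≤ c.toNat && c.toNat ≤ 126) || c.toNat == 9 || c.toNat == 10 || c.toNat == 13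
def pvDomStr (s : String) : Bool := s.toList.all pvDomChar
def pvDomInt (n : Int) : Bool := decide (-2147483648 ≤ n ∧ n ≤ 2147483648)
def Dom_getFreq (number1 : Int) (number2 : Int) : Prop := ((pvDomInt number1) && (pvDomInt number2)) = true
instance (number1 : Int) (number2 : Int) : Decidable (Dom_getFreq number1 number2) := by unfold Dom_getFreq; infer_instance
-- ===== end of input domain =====

-- B replaces A's str()-length + arithmetic concatenation by marking the digits of each
-- operand independently (objective: simpler; return value proved equal for all ints).

-- the Python 'while n > 0: freq[n % 10] = 1; n //= 10' loop (appears in A once, in B per operand)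
def pvMarkLoop (n : Int) (freq : List Int) : List Int :=
  if _h : 0 < n then
    pvMarkLoop (PySem.Int.floordiv n 10) (PySem.List.pySetD freq (PySem.Int.mod n 10) 1)
  else freq
termination_by n.toNat
decreasing_by
  have h10 : (0:Int) < 10 := by norm_num
  rw [PySem.Int.floordiv_eq_ediv_of_pos h10]
  omega

-- ===== PORT A =====
def getFreq (number1 : Int) (number2 : Int) : List Int :=
  let number1 := |number1|
  let number2 := |number2|
  let digits : Int := if number2 ≠ 0 then PySem.Str.len (PySem.Int.toStr number2) else 0
  let number := number1 * (10 ^ digits.toNat) + number2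
  pvMarkLoop number (List.replicate 10 0)

-- ===== PORT B =====
def getFreq_alt (number1 : Int) (number2 : Int) : List Int :=
  let freq := List.replicate 10 (0 : Int)
  pvMarkLoop |number2| (pvMarkLoop |number1| freq)

-- ===== PRECONDITION & SPEC =====
def Spec_getFreq (number1 : Int) (number2 : Int) (out : List Int) : Prop := out = getFreq_alt number1 number2
instance (number1 : Int) (number2 : Int) (out : List Int) : Decidable (Spec_getFreq number1 number2 out) := by unfold Spec_getFreq; infer_instance

-- ===== CLAIM (what is proved, stated in full; the proofs are below) =====
def Claim_equal_getFreq : Prop := ∀ (number1 : Int) (number2 : Int), Dom_getFreq number1 number2 → Spec_getFreq number1 number2 (getFreq number1 number2)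

-- ===== LEMMAS AND PROOFS =====

-- Nat version of the marking loop, for the arithmetic.
def pvNatMark (n : Nat) (freq : List Int) : List Int :=
  if h : n = 0 then freq else pvNatMark (n / 10) (freq.set (n % 10) 1)
termination_by n
decreasing_by omega

theorem pvMarkLoop_natCast (n : Nat) (freq : List Int) :
    pvMarkLoop (n : Int) freq = pvNatMark n freq := by
  induction n using Nat.strong_induction_on generalizing freq with
  | _ n ih =>
    rw [pvMarkLoop, pvNatMark]
    by_cases hn : n = 0
    · subst hn; norm_num
    · have hpos : (0:Int) < (n:Int) := by exact_mod_cast Nat.pos_of_ne_zero hn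
      rw [dif_pos hpos, dif_neg hn]
      have hf : PySem.Int.floordiv (n : Int) 10 = ((n / 10 : Nat) : Int) := by
        exact_mod_cast PySem.Int.floordiv_natCast n 10
      have hm : PySem.Int.mod (n : Int) 10 = ((n % 10 : Nat) : Int) := by
        exact_mod_cast PySem.Int.mod_natCast n 10
      rw [hf, hm, PySem.List.pySetD_natCast]
      exact ih (n / 10) (by omega) _

-- exact length of Nat.toDigits 10
def pvNumDigits (n : Nat) : Nat :=
  if n < 10 then 1 else pvNumDigits (n / 10) + 1
termination_by n
decreasing_by omega

theorem pvToDigitsCore_length (f : Nat) : ∀ n : Nat, n / 10 < f →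
    (Nat.toDigitsCore 10 f n []).length = pvNumDigits n := by
  induction f with
  | zero => intro n h; omega
  | succ f ih =>
    intro n h
    rw [Nat.toDigitsCore, pvNumDigits]
    by_cases h10 : n < 10
    · have : n / 10 = 0 := by omega
      simp [this, h10]
    · have hq : n / 10 ≠ 0 := by omega
      rw [if_neg hq, if_neg h10]
      rw [Nat.toDigitsCore_lens_eq]
      rw [ih (n / 10) (by omega)]

theorem pvToDigits_length (n : Nat) : (Nat.toDigits 10 n).length = pvNumDigits n := by
  unfold Nat.toDigits
  exact pvToDigitsCore_length (n + 1) n (by omega)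

theorem pvNumDigits_bounds (n : Nat) (hn : 0 < n) :
    10 ^ (pvNumDigits n - 1) ≤ n ∧ n < 10 ^ pvNumDigits n := by
  induction n using Nat.strong_induction_on with
  | _ n ih =>
    rw [pvNumDigits]
    by_cases h10 : n < 10
    · rw [if_pos h10]
      refine ⟨by simpa using hn, by simpa using h10⟩
    · rw [if_neg h10]
      have hq : 0 < n / 10 := by omega
      have := ih (n / 10) (by omega) hq
      rcases this with ⟨hlo, hhi⟩
      constructor
      · have h1 : 1 ≤ pvNumDigits (n / 10) := by
          rw [pvNumDigits]; split <;> omega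
        have : pvNumDigits (n / 10) + 1 - 1 = (pvNumDigits (n / 10) - 1) + 1 := by omega
        rw [this, pow_succ]
        have : 10 ^ (pvNumDigits (n / 10) - 1) * 10 ≤ (n / 10) * 10 := by
          exact Nat.mul_le_mul_right 10 hlo
        omega
      · rw [pow_succ]
        have : (n / 10 + 1) * 10 ≤ 10 ^ pvNumDigits (n / 10) * 10 := by
          exact Nat.mul_le_mul_right 10 (by omega)
        omega

theorem pvNatMark_zero (f : List Int) : pvNatMark 0 f = f := by rw [pvNatMark]; simp

theorem pvMarkLoop_zero (f : List Int) : pvMarkLoop 0 f = f := by rw [pvMarkLoop]; simp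

-- key concatenation lemma: marking a*10^d + b (b exactly d digits) = marking b then a
theorem pvNatMark_concat : ∀ (d : Nat), 1 ≤ d → ∀ (a b : Nat) (f : List Int),
    10 ^ (d - 1) ≤ b → b < 10 ^ d →
    pvNatMark (a * 10 ^ d + b) f = pvNatMark a (pvNatMark b f) := by
  intro d
  induction d with
  | zero => omega
  | succ d ih =>
    intro _ a b f hlo hhi
    have hb0 : b ≠ 0 := by
      have : 0 < 10 ^ (d + 1 - 1) := Nat.pow_pos (by norm_num)
      omega
    have hne : a * 10 ^ (d + 1) + b ≠ 0 := by positivity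
    have hstep : pvNatMark b f = pvNatMark (b / 10) (f.set (b % 10) 1) := by
      rw [pvNatMark, dif_neg hb0]
    rw [pvNatMark, dif_neg hne, hstep]
    by_cases hd : d = 0
    · subst hd
      simp only [zero_add, pow_one] at hhi ⊢
      simp only [Nat.add_sub_cancel, pow_zero] at hlo
      have e1 : (a * 10 + b) % 10 = b := by omega
      have e2 : (a * 10 + b) / 10 = a := by omega
      have e3 : b % 10 = b := by omega
      have e4 : b / 10 = 0 := by omega
      rw [e1, e2, e3, e4, pvNatMark_zero]
    · have hd1 : 1 ≤ d := by omega
      have e1 : (a * 10 ^ (d + 1) + b) % 10 = b % 10 := by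
        rw [pow_succ, ← mul_assoc]; omega
      have e2 : (a * 10 ^ (d + 1) + b) / 10 = a * 10 ^ d + b / 10 := by
        rw [pow_succ, ← mul_assoc]; omega
      rw [e1, e2]
      have hlo' : 10 ^ (d - 1) ≤ b / 10 := by
        have he : d + 1 - 1 = (d - 1) + 1 := by omega
        rw [he, pow_succ] at hlo
        omega
      have hhi' : b / 10 < 10 ^ d := by
        rw [pow_succ] at hhi
        omega
      exact ih hd1 a (b / 10) _ hlo' hhi'


theorem pvNatMark_set (n : Nat) : ∀ (f : List Int) (i : Nat),
    pvNatMark n (f.set i 1) = (pvNatMark n f).set i 1 := by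
  induction n using Nat.strong_induction_on with
  | _ n ih =>
    intro f i
    by_cases hn : n = 0
    · subst hn; rw [pvNatMark_zero, pvNatMark_zero]
    · rw [pvNatMark, dif_neg hn]
      conv_rhs => rw [pvNatMark, dif_neg hn]
      rw [← ih (n / 10) (by omega)]
      by_cases hi : i = n % 10
      · subst hi; simp [List.set_set]
      · rw [List.set_comm 1 1 hi]

theorem pvNatMark_comm (a : Nat) : ∀ (b : Nat) (f : List Int),
    pvNatMark a (pvNatMark b f) = pvNatMark b (pvNatMark a f) := by
  induction a using Nat.strong_induction_on with
  | _ a ih =>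
    intro b f
    by_cases ha : a = 0
    · subst ha; rw [pvNatMark_zero, pvNatMark_zero]
    · conv_lhs => rw [pvNatMark, dif_neg ha]
      conv_rhs => rw [show pvNatMark a f = pvNatMark (a / 10) (f.set (a % 10) 1) from by
        rw [pvNatMark, dif_neg ha]]
      rw [← pvNatMark_set, ih (a / 10) (by omega), pvNatMark_set]

-- length of str(number2) for number2 > 0 is pvNumDigits number2
theorem pvToStr_len (n : Int) (hn : 0 < n) :
    PySem.Str.len (PySem.Int.toStr n) = (pvNumDigits n.toNat : Int) := by
  rw [PySem.Str.len_eq]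
  rw [PySem.Int.toList_toStr]
  unfold PySem.Int.toChars
  rw [if_neg (by omega)]
  rw [pvToDigits_length]

-- ===== VERDICT (by name: the statement is the Claim_ definition above) =====
theorem getFreq_spec : Claim_equal_getFreq := by
  intro number1 number2 _
  unfold Spec_getFreq getFreq getFreq_alt
  set a := number1.natAbs with ha
  set b := number2.natAbs with hb
  have habs1 : |number1| = (a : Int) := Int.abs_eq_natAbs number1
  have habs2 : |number2| = (b : Int) := Int.abs_eq_natAbs number2
  simp only [habs1, habs2]
  by_cases hz : number2 = 0
  · have hb0 : b = 0 := by simp [hb, hz]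
    simp only [hb0]
    norm_num
    rw [pvMarkLoop_natCast, pvMarkLoop_zero]
  · have hbne : (b : Int) ≠ 0 := by
      simp [hb]
      omega
    rw [if_pos hbne]
    have hbpos : (0:Int) < (b : Int) := by
      have : (0:Int) ≤ (b : Int) := Int.natCast_nonneg b
      omega
    rw [pvToStr_len _ hbpos]
    have htoNat : ((pvNumDigits (b : Int).toNat : Int)).toNat = pvNumDigits (b : Int).toNat := by
      simp
    rw [htoNat]
    have hbn : ((b : Int)).toNat = b := rfl
    rw [hbn]
    have hcast : (a : Int) * (10 : Int) ^ pvNumDigits b + (b : Int)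
        = ((a * 10 ^ pvNumDigits b + b : Nat) : Int) := by push_cast; ring
    rw [hcast, pvMarkLoop_natCast, pvMarkLoop_natCast, pvMarkLoop_natCast]
    have hbpos' : 0 < b := by exact_mod_cast hbpos
    obtain ⟨hlo, hhi⟩ := pvNumDigits_bounds b hbpos'
    have hd1 : 1 ≤ pvNumDigits b := by rw [pvNumDigits]; split <;> omega
    rw [pvNatMark_concat (pvNumDigits b) hd1 a b _ hlo hhi, pvNatMark_comm]
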